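-- pv_equiv track=rewrite | github.com/uclaacm/lactf-archive | 2026/pwn/adventure/solve.py | simulate_placement
-- ===== SOURCE A (Python) =====
-- BOARD_SIZE = 16
--
-- def simulate_placement(addr_bytes_dict):
--     sim_board = [[0] * BOARD_SIZE for _ in range(BOARD_SIZE)]
--     positions = {}
--     for i in range(7, -1, -1):
--         if i not in addr_bytes_dict:
--             continue
--         byte_val = addr_bytes_dict[i]
--         x = (byte_val >> 4) & 0x0F
--         y = byte_val & 0x0F
--         while sim_board[y][x] != 0:
--             x = (x + 1) % BOARD_SIZE
--             if x == 0:
--                 y = (y + 1) % BOARD_SIZE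
--         sim_board[y][x] = i + 1
--         positions[i] = (x, y)
--     return positions
-- ===== SOURCE B (Python) =====
-- def simulate_placement(addr_bytes_dict):
--     occupied = []
--     positions = {}
--     for i in range(7, -1, -1):
--         if i not in addr_bytes_dict:
--             continue
--         byte_val = addr_bytes_dict[i]
--         start = (byte_val % 16) * 16 + (byte_val // 16) % 16
--         free = [p for p in range(256) if p not in occupied]
--         pos = min(free, key=lambda p: (p - start) % 256)
--         occupied.append(pos)
--         positions[i] = (pos % 16, pos // 16)
--     return positions
-- ===== Notes on version B (the rewrite author's own statement) =====
-- stated objective: alternative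
-- what changed: B eliminates A's sequential probing over a 16x16 board entirely: it keeps a list of occupied flat slots and selects each placement directly as the free slot of 0..255 minimizing the cyclic distance (p - start) % 256, a min-by-key selection instead of a while-loop probe.
import Mathlib
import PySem

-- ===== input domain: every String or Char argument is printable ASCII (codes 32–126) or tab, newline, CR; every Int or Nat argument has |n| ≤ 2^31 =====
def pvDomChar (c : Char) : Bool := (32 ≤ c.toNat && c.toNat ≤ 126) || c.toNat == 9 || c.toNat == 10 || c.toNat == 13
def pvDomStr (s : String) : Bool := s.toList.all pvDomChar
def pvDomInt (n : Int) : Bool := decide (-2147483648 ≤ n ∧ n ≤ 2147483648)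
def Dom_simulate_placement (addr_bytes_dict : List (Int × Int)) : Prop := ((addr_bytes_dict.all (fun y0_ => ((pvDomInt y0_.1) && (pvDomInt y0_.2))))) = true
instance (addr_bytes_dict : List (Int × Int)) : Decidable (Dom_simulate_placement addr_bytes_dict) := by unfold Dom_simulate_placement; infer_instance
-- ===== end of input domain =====

-- ===== PORT A =====
-- B replaces A's sequential board probing with a direct min-by-cyclic-distance selection
-- over the free flat slots (objective: alternative).

-- 2D board read/write; the algorithm only ever uses indices in [0,16), where these are
-- exact ports of Python's sim_board[y][x] read and assignment.
def pvGet2 (b : List (List Int)) (y x : Int) : Int :=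
  (PySem.List.pyGet? ((PySem.List.pyGet? b y).getD []) x).getD 0

def pvSet2 (b : List (List Int)) (y x v : Int) : List (List Int) :=
  b.set y.toNat ((b.getD y.toNat []).set x.toNat v)

-- A's while loop; fuel 256 is enough: at most 8 of the 256 cells are ever occupied,
-- so the probe always ends within 256 steps (fuel only makes the loop structural).
def probeA (fuel : Nat) (b : List (List Int)) (x y : Int) : Int × Int :=
  match fuel with
  | 0 => (x, y)
  | f + 1 =>
    if pvGet2 b y x ≠ 0 then
      let x' := PySem.Int.mod (x + 1) 16
      let y' := if x' = 0 then PySem.Int.mod (y + 1) 16 else y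
      probeA f b x' y'
    else (x, y)

def stepA (d : PySem.Dict Int Int) (st : List (List Int) × List (Int × Int × Int)) (i : Int) :
    List (List Int) × List (Int × Int × Int) :=
  match PySem.Dict.get? d i with
  | none => st
  | some byte_val =>
    let x := PySem.Int.band (byte_val >>> (4 : Nat)) 15   -- (byte_val >> 4) & 0x0F
    let y := PySem.Int.band byte_val 15                   -- byte_val & 0x0F
    let p := probeA 256 st.1 x y
    (pvSet2 st.1 p.2 p.1 (i + 1), st.2 ++ [(i, p.1, p.2)])

def simulate_placement (addr_bytes_dict : List (Int × Int)) : List (Int × Int × Int) :=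
  ((PySem.List.pyRange 7 (-1) (-1)).foldl (stepA (PySem.Dict.ofList addr_bytes_dict))
    (List.replicate 16 (List.replicate 16 0), [])).2

-- ===== PORT B =====
-- B's step: no probe loop — pick the free flat slot minimizing cyclic distance from start.
-- (min() never sees an empty list: at most 8 of the 256 slots are ever occupied; the
-- .getD 0 only totalizes the Option.)
def stepB (d : PySem.Dict Int Int) (st : List Int × List (Int × Int × Int)) (i : Int) :
    List Int × List (Int × Int × Int) :=
  match PySem.Dict.get? d i with
  | none => st
  | some byte_val =>
    let start := PySem.Int.mod byte_val 16 * 16 +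
      PySem.Int.mod (PySem.Int.floordiv byte_val 16) 16   -- (bv % 16)*16 + (bv // 16) % 16
    let free := (PySem.List.pyRange 0 256 1).filter (fun p => decide (p ∉ st.1))
    let pos := (PySem.List.min? free (fun p => PySem.Int.mod (p - start) 256)).getD 0
    (st.1 ++ [pos], st.2 ++ [(i, PySem.Int.mod pos 16, PySem.Int.floordiv pos 16)])

def simulate_placement_alt (addr_bytes_dict : List (Int × Int)) : List (Int × Int × Int) :=
  ((PySem.List.pyRange 7 (-1) (-1)).foldl (stepB (PySem.Dict.ofList addr_bytes_dict))
    ([], [])).2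

-- ===== PRECONDITION & SPEC =====
def Spec_simulate_placement (addr_bytes_dict : List (Int × Int)) (out : List (Int × Int × Int)) : Prop := out = simulate_placement_alt addr_bytes_dict
instance (addr_bytes_dict : List (Int × Int)) (out : List (Int × Int × Int)) : Decidable (Spec_simulate_placement addr_bytes_dict out) := by unfold Spec_simulate_placement; infer_instance

-- ===== CLAIM (what is proved, stated in full; the proofs are below) =====
def Claim_equal_simulate_placement : Prop := ∀ (addr_bytes_dict : List (Int × Int)), Dom_simulate_placement addr_bytes_dict → Spec_simulate_placement addr_bytes_dict (simulate_placement addr_bytes_dict)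

-- ===== LEMMAS AND PROOFS =====

-- A's x,y nibbles are B's % 16 / // 16 nibbles
theorem pvBand15 (a : Int) : PySem.Int.band a 15 = PySem.Int.mod a 16 := by
  have hn : ∀ n : Nat, n &&& 15 = n % 16 := by
    intro n; have := Nat.and_two_pow_sub_one_eq_mod n 4; norm_num at this; omega
  rw [PySem.Int.mod_eq_emod_of_pos (by norm_num)]
  unfold PySem.Int.band
  by_cases h : 0 ≤ a
  · simp [h, hn]
  · simp [h, Nat.and_comm, hn]; omega

theorem pvShr4 (a : Int) : a >>> (4 : Nat) = PySem.Int.floordiv a 16 := by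
  rw [PySem.Int.floordiv_eq_ediv_of_pos (by norm_num), Int.shiftRight_eq_div_pow]
  norm_num

-- the board is always 16 rows of 16 cells
def pvWf (b : List (List Int)) : Prop := b.length = 16 ∧ ∀ r ∈ b, r.length = 16

-- correspondence between A's board and B's occupied list of flat slots
def pvInv (b : List (List Int)) (occ : List Int) : Prop :=
  ∀ x y : Int, 0 ≤ x → x < 16 → 0 ≤ y → y < 16 →
    (pvGet2 b y x ≠ 0 ↔ (16 * y + x) ∈ occ)

theorem pvGet2_eq (b : List (List Int)) (y x : Int) (hy0 : 0 ≤ y) (hx0 : 0 ≤ x) :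
    pvGet2 b y x = (b[y.toNat]?.getD [])[x.toNat]?.getD 0 := by
  rw [show pvGet2 b y x =
      (PySem.List.pyGet? ((PySem.List.pyGet? b ((y.toNat : Nat) : Int)).getD []) ((x.toNat : Nat) : Int)).getD 0 from by
        rw [Int.toNat_of_nonneg hy0, Int.toNat_of_nonneg hx0]; rfl]
  rw [PySem.List.pyGet?_natCast b y.toNat, PySem.List.pyGet?_natCast]

theorem pvWf_set2 (b : List (List Int)) (y x v : Int) (hw : pvWf b)
    (hy0 : 0 ≤ y) (hy : y < 16) : pvWf (pvSet2 b y x v) := by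
  obtain ⟨hlen, hrow⟩ := hw
  have hylt : y.toNat < b.length := by omega
  constructor
  · simp [pvSet2, hlen]
  · intro r hr
    rcases List.mem_or_eq_of_mem_set hr with h | h
    · exact hrow r h
    · subst h
      rw [List.length_set, List.getD_eq_getElem b [] hylt]
      exact hrow _ (List.getElem_mem hylt)

theorem pvGet2_set2 (b : List (List Int)) (y x y' x' v : Int) (hw : pvWf b)
    (hx0 : 0 ≤ x) (hx : x < 16) (hy0 : 0 ≤ y) (hy : y < 16)
    (hx0' : 0 ≤ x') (hx' : x' < 16) (hy0' : 0 ≤ y') (hy' : y' < 16) :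
    pvGet2 (pvSet2 b y x v) y' x' =
      if y' = y ∧ x' = x then v else pvGet2 b y' x' := by
  obtain ⟨hlen, hrow⟩ := hw
  have hylt : y.toNat < b.length := by omega
  have hrowy : b[y.toNat]? = some (b.getD y.toNat []) := by
    rw [List.getD_eq_getElem?_getD, List.getElem?_eq_getElem hylt]; rfl
  have hbl : (b.getD y.toNat []).length = 16 := by
    rw [List.getD_eq_getElem?_getD, List.getElem?_eq_getElem hylt, Option.getD_some]
    exact hrow _ (List.getElem_mem hylt)
  rw [pvGet2_eq _ _ _ hy0' hx0', pvGet2_eq _ _ _ hy0' hx0']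
  unfold pvSet2
  rw [List.getElem?_set]
  by_cases hyy : y' = y
  · rw [if_pos (by omega : y.toNat = y'.toNat), if_pos (by omega : y.toNat < b.length),
        Option.getD_some, List.getElem?_set, hbl,
        show b[y'.toNat]? = some (b.getD y.toNat []) from by
          rw [show y'.toNat = y.toNat from by omega]; exact hrowy,
        Option.getD_some, if_pos (show x.toNat < 16 by omega)]
    split_ifs with h1 h2 h3
    · rfl
    · exact absurd ⟨hyy, by omega⟩ h2
    · exact absurd h3.2 (by omega)
    · rfl
  · rw [if_neg (by omega : ¬ y.toNat = y'.toNat), if_neg (by tauto)]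

theorem pvInv_upd (b : List (List Int)) (occ : List Int) (x y v : Int)
    (hw : pvWf b) (hinv : pvInv b occ) (hv : v ≠ 0)
    (hx0 : 0 ≤ x) (hx : x < 16) (hy0 : 0 ≤ y) (hy : y < 16) :
    pvInv (pvSet2 b y x v) (occ ++ [16 * y + x]) := by
  intro x' y' hx0' hx' hy0' hy'
  rw [pvGet2_set2 b y x y' x' v hw hx0 hx hy0 hy hx0' hx' hy0' hy']
  simp only [List.mem_append, List.mem_singleton]
  split_ifs with h
  · exact ⟨fun _ => Or.inr (by omega), fun _ => hv⟩
  · rw [hinv x' y' hx0' hx' hy0' hy']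
    constructor
    · exact fun hm => Or.inl hm
    · rintro (hm | he)
      · exact hm
      · exact absurd ⟨by omega, by omega⟩ h

-- flat linear probe: proof-only bridge between A's 2D probe and B's min-selection
def pvFlat (f : Nat) (occ : List Int) (pos : Int) : Int :=
  match f with
  | 0 => pos
  | f + 1 => if pos ∈ occ then pvFlat f occ (PySem.Int.mod (pos + 1) 256) else pos

-- A's 2D probe computes the flat linear probe
theorem pvProbe_flat (f : Nat) (b : List (List Int)) (occ : List Int) (x y : Int)
    (hinv : pvInv b occ)
    (hx0 : 0 ≤ x) (hx : x < 16) (hy0 : 0 ≤ y) (hy : y < 16) :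
    0 ≤ (probeA f b x y).1 ∧ (probeA f b x y).1 < 16 ∧
    0 ≤ (probeA f b x y).2 ∧ (probeA f b x y).2 < 16 ∧
    pvFlat f occ (16 * y + x) = 16 * (probeA f b x y).2 + (probeA f b x y).1 := by
  induction f generalizing x y with
  | zero => exact ⟨hx0, hx, hy0, hy, rfl⟩
  | succ f ih =>
    have hmem : pvGet2 b y x ≠ 0 ↔ (16 * y + x) ∈ occ := hinv x y hx0 hx hy0 hy
    by_cases hm : (16 * y + x) ∈ occ
    · have hC : pvGet2 b y x ≠ 0 := hmem.mpr hm
      simp only [probeA, pvFlat, if_pos hm, if_pos hC]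
      have e1 : PySem.Int.mod (x + 1) 16 = (x + 1) % 16 :=
        PySem.Int.mod_eq_emod_of_pos (by norm_num)
      have e2 : PySem.Int.mod (y + 1) 16 = (y + 1) % 16 :=
        PySem.Int.mod_eq_emod_of_pos (by norm_num)
      have e3 : PySem.Int.mod (16 * y + x + 1) 256 = (16 * y + x + 1) % 256 :=
        PySem.Int.mod_eq_emod_of_pos (by norm_num)
      by_cases hz : PySem.Int.mod (x + 1) 16 = 0
      · rw [if_pos hz]
        have hpos : PySem.Int.mod (16 * y + x + 1) 256 =
            16 * PySem.Int.mod (y + 1) 16 + PySem.Int.mod (x + 1) 16 := by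
          rw [e1, e2, e3]; rw [e1] at hz; omega
        rw [hpos, hz]
        exact ih _ _ (by omega) (by omega) (by rw [e2]; omega) (by rw [e2]; omega)
      · rw [if_neg hz]
        have hpos : PySem.Int.mod (16 * y + x + 1) 256 =
            16 * y + PySem.Int.mod (x + 1) 16 := by
          rw [e1, e3]; rw [e1] at hz; omega
        rw [hpos]
        exact ih _ _ (by rw [e1]; omega) (by rw [e1]; omega) hy0 hy
    · have hC : ¬ pvGet2 b y x ≠ 0 := fun h => hm (hmem.mp h)
      simp only [probeA, pvFlat]
      rw [if_neg hC, if_neg hm]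
      exact ⟨hx0, hx, hy0, hy, rfl⟩

-- the flat probe returns the slot at the least free cyclic distance from the start
theorem pvShift (s k : Int) : ((s + 1) % 256 + k) % 256 = (s + k + 1) % 256 := by omega

theorem pvFlat_spec (occ : List Int) (f : Nat) (s : Int) (hs0 : 0 ≤ s) (hs : s < 256)
    (hex : ∃ j : Nat, j < f ∧ (s + (j : Int)) % 256 ∉ occ) :
    ∃ j0 : Nat, j0 < f ∧ pvFlat f occ s = (s + (j0 : Int)) % 256 ∧
      (s + (j0 : Int)) % 256 ∉ occ ∧
      ∀ t : Nat, t < j0 → (s + (t : Int)) % 256 ∈ occ := by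
  induction f generalizing s with
  | zero => obtain ⟨j, hj, _⟩ := hex; omega
  | succ f ih =>
    by_cases hm : s ∈ occ
    · have e1 : PySem.Int.mod (s + 1) 256 = (s + 1) % 256 :=
        PySem.Int.mod_eq_emod_of_pos (by norm_num)
      have es : (s : Int) % 256 = s := by omega
      obtain ⟨j, hj, hjf⟩ := hex
      have hjne : j ≠ 0 := by
        intro h; subst h; simp only [Nat.cast_zero, add_zero] at hjf; rw [es] at hjf
        exact hjf hm
      have hrec : ∃ j' : Nat, j' < f ∧ ((s + 1) % 256 + (j' : Int)) % 256 ∉ occ := by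
        refine ⟨j - 1, by omega, ?_⟩
        rw [pvShift, show s + ((j - 1 : Nat) : Int) + 1 = s + (j : Int) from by
          push_cast [Nat.cast_sub (by omega : 1 ≤ j)]; ring]
        exact hjf
      obtain ⟨j0', hj0f, heq, hfree, hocc⟩ :=
        ih ((s + 1) % 256) (by omega) (by omega) hrec
      refine ⟨j0' + 1, by omega, ?_, ?_, ?_⟩
      · simp only [pvFlat, if_pos hm, e1]
        rw [heq, pvShift]
        congr 1
        push_cast
        ring
      · rw [show (s + ((j0' + 1 : Nat) : Int)) % 256 = ((s + 1) % 256 + (j0' : Int)) % 256 from by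
          rw [pvShift]; congr 1; push_cast; ring]
        exact hfree
      · intro t ht
        match t with
        | 0 => simp only [Nat.cast_zero, add_zero]; rw [es]; exact hm
        | t' + 1 =>
          have := hocc t' (by omega)
          rw [pvShift] at this
          rw [show (s + ((t' + 1 : Nat) : Int)) = s + (t' : Int) + 1 from by push_cast; ring]
          exact this
    · refine ⟨0, by omega, by simp [pvFlat, hm]; omega, ?_, by omega⟩
      simp only [Nat.cast_zero, add_zero]
      rw [show s % 256 = s from by omega]
      exact hm

-- fewer than 256 distinct occupied slots leave a free one
theorem pvFree_exists (occ : List Int) (hnd : occ.Nodup) (hlen : occ.length < 256) :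
    ∃ p : Int, 0 ≤ p ∧ p < 256 ∧ p ∉ occ := by
  by_contra hcon
  push_neg at hcon
  have hsub : Finset.Icc (0:Int) 255 ⊆ occ.toFinset := by
    intro p hp
    rw [Finset.mem_Icc] at hp
    rw [List.mem_toFinset]
    exact hcon p hp.1 (by omega)
  have hcard := Finset.card_le_card hsub
  rw [Int.card_Icc, List.toFinset_card_of_nodup hnd] at hcard
  simp at hcard
  omega

-- B's min-by-cyclic-distance selection picks exactly the least-free-distance slot
theorem pvMin_eq (occ : List Int) (s : Int) (hs0 : 0 ≤ s) (hs : s < 256)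
    (j0 : Nat) (hj : j0 < 256) (hfree : (s + (j0 : Int)) % 256 ∉ occ)
    (hocc : ∀ t : Nat, t < j0 → (s + (t : Int)) % 256 ∈ occ) :
    (PySem.List.min? ((PySem.List.pyRange 0 256 1).filter (fun p => decide (p ∉ occ)))
      (fun p => PySem.Int.mod (p - s) 256)).getD 0 = (s + (j0 : Int)) % 256 := by
  set q : Int := (s + (j0 : Int)) % 256 with hq
  have hq0 : 0 ≤ q := by omega
  have hq256 : q < 256 := by omega
  have hqfree : q ∈ (PySem.List.pyRange 0 256 1).filter (fun p => decide (p ∉ occ)) := by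
    rw [List.mem_filter, PySem.List.mem_pyRange_one]
    exact ⟨⟨hq0, hq256⟩, by simpa using hfree⟩
  have hkey : ∀ p : Int, PySem.Int.mod (p - s) 256 = (p - s) % 256 := fun p =>
    PySem.Int.mod_eq_emod_of_pos (by norm_num)
  have hkq : (q - s) % 256 = (j0 : Int) := by
    rw [hq]
    conv_lhs => rw [Int.sub_emod, Int.emod_emod_of_dvd _ (by norm_num : (256:Int) ∣ 256),
      ← Int.sub_emod]
    omega
  cases hmv : PySem.List.min? ((PySem.List.pyRange 0 256 1).filter (fun p => decide (p ∉ occ)))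
      (fun p => PySem.Int.mod (p - s) 256) with
  | none =>
    rw [PySem.List.min?_eq_none_iff] at hmv
    rw [hmv] at hqfree
    exact absurd hqfree (List.not_mem_nil)
  | some m =>
    have hmmem := PySem.List.min?_mem hmv
    have hmin := PySem.List.min?_isMin hmv
    rw [List.mem_filter, PySem.List.mem_pyRange_one] at hmmem
    obtain ⟨⟨hm0, hm256⟩, hmfree⟩ := hmmem
    have hmnocc : m ∉ occ := by simpa using hmfree
    have hle : PySem.Int.mod (m - s) 256 ≤ PySem.Int.mod (q - s) 256 := hmin q hqfree
    rw [hkey, hkey, hkq] at hle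
    set t : Int := (m - s) % 256 with ht
    have ht0 : 0 ≤ t := by omega
    have ht256 : t < 256 := by omega
    have hmrep : m = (s + t) % 256 := by
      rw [ht]
      conv_lhs => rw [show m = (m : Int) % 256 from by omega]
      rw [Int.add_emod, Int.emod_emod_of_dvd _ (by norm_num : (256:Int) ∣ 256), ← Int.add_emod]
      congr 1
      omega
    have htge : (j0 : Int) ≤ t := by
      by_contra hlt
      push_neg at hlt
      have := hocc t.toNat (by omega)
      rw [show ((t.toNat : Nat) : Int) = t from by omega, ← hmrep] at this
      exact hmnocc this
    have : t = (j0 : Int) := le_antisymm hle htge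
    rw [Option.getD_some, hmrep, this]

-- the two folds agree on the positions output
theorem pvFold_agree (d : PySem.Dict Int Int) (l : List Int)
    (b : List (List Int)) (occ : List Int) (ps : List (Int × Int × Int))
    (hl : ∀ j ∈ l, 0 ≤ j)
    (hw : pvWf b) (hinv : pvInv b occ) (hnd : occ.Nodup)
    (hlen : occ.length + l.length ≤ 256) :
    (l.foldl (stepA d) (b, ps)).2 = (l.foldl (stepB d) (occ, ps)).2 := by
  induction l generalizing b occ ps with
  | nil => rfl
  | cons i l ih =>
    simp only [List.foldl_cons]
    cases hD : PySem.Dict.get? d i with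
    | none =>
      rw [show stepA d (b, ps) i = (b, ps) from by simp [stepA, hD],
          show stepB d (occ, ps) i = (occ, ps) from by simp [stepB, hD]]
      exact ih b occ ps (fun j hj => hl j (List.mem_cons_of_mem _ hj)) hw hinv hnd
        (by simp at hlen ⊢; omega)
    | some bv =>
      -- start coordinates
      set X : Int := PySem.Int.mod (PySem.Int.floordiv bv 16) 16 with hX
      set Y : Int := PySem.Int.mod bv 16 with hY
      have hxeq : PySem.Int.band (bv >>> (4 : Nat)) 15 = X := by rw [pvShr4, pvBand15]
      have hX0 : 0 ≤ X := PySem.Int.mod_nonneg _ (by norm_num)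
      have hX16 : X < 16 := PySem.Int.mod_lt _ (by norm_num)
      have hY0 : 0 ≤ Y := PySem.Int.mod_nonneg _ (by norm_num)
      have hY16 : Y < 16 := PySem.Int.mod_lt _ (by norm_num)
      set s : Int := 16 * Y + X with hsdef
      have hs0 : 0 ≤ s := by omega
      have hs256 : s < 256 := by omega
      -- A's probe = flat probe
      obtain ⟨hp1, hp2, hp3, hp4, hp5⟩ := pvProbe_flat 256 b occ X Y hinv hX0 hX16 hY0 hY16
      -- flat probe = least free distance
      have hlex : ∃ j : Nat, j < 256 ∧ (s + (j : Int)) % 256 ∉ occ := by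
        obtain ⟨p, hp0, hp256, hpf⟩ := pvFree_exists occ hnd (by simp at hlen; omega)
        refine ⟨((p - s) % 256).toNat, by omega, ?_⟩
        rw [show (((((p - s) % 256).toNat : Nat)) : Int) = (p - s) % 256 from by omega]
        rw [Int.add_emod, Int.emod_emod_of_dvd _ (by norm_num : (256:Int) ∣ 256), ← Int.add_emod]
        rw [show (s + (p - s)) = p from by ring, show p % 256 = p from by omega]
        exact hpf
      obtain ⟨j0, hj0, hfeq, hffree, hfocc⟩ := pvFlat_spec occ 256 s hs0 hs256 hlex
      -- B's min picks the same slot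
      have hmin := pvMin_eq occ s hs0 hs256 j0 hj0 hffree hfocc
      set q : Int := (s + (j0 : Int)) % 256 with hqd
      -- after `set`, hfeq : pvFlat 256 occ s = q, hffree : q ∉ occ, hmin's RHS is q
      have hqA : q = 16 * (probeA 256 b X Y).2 + (probeA 256 b X Y).1 := by
        rw [← hfeq]; exact hp5
      have hq0 : 0 ≤ q := by omega
      have hq256 : q < 256 := by omega
      have hmodp : PySem.Int.mod q 16 = (probeA 256 b X Y).1 := by
        rw [PySem.Int.mod_eq_emod_of_pos (by norm_num), hqA]; omega
      have hdivp : PySem.Int.floordiv q 16 = (probeA 256 b X Y).2 := by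
        rw [PySem.Int.floordiv_eq_ediv_of_pos (by norm_num), hqA]; omega
      have hstepA : stepA d (b, ps) i =
          (pvSet2 b (probeA 256 b X Y).2 (probeA 256 b X Y).1 (i + 1),
            ps ++ [(i, (probeA 256 b X Y).1, (probeA 256 b X Y).2)]) := by
        simp only [stepA, hD, hxeq, pvBand15, ← hY]
      have hstepB : stepB d (occ, ps) i =
          (occ ++ [q], ps ++ [(i, (probeA 256 b X Y).1, (probeA 256 b X Y).2)]) := by
        simp only [stepB, hD, ← hX, ← hY]
        rw [show Y * 16 + X = s from by rw [hsdef]; ring]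
        rw [hmin, hmodp, hdivp]
      rw [hstepA, hstepB]
      have hi0 : 0 ≤ i := hl i List.mem_cons_self
      exact ih (pvSet2 b (probeA 256 b X Y).2 (probeA 256 b X Y).1 (i + 1)) (occ ++ [q])
        (ps ++ [(i, (probeA 256 b X Y).1, (probeA 256 b X Y).2)])
        (fun j hj => hl j (List.mem_cons_of_mem _ hj))
        (pvWf_set2 _ _ _ _ hw hp3 hp4)
        (by have h := pvInv_upd b occ (probeA 256 b X Y).1 (probeA 256 b X Y).2 (i + 1)
              hw hinv (by omega) hp1 hp2 hp3 hp4
            rw [← hqA] at h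
            exact h)
        (by rw [List.nodup_append]
            refine ⟨hnd, List.nodup_singleton q, ?_⟩
            intro a ha c hc
            rw [List.mem_singleton] at hc
            subst hc
            exact fun h => hffree (h ▸ ha))
        (by simp at hlen ⊢; omega)

-- ===== VERDICT (by name: the statement is the Claim_ definition above) =====
theorem simulate_placement_spec : Claim_equal_simulate_placement := by
  intro d _
  unfold Spec_simulate_placement simulate_placement simulate_placement_alt
  apply pvFold_agree
  · intro j hj
    rw [PySem.List.mem_pyRange_neg_one] at hj
    omega
  · exact ⟨by simp, by intro r hr; rw [List.eq_of_mem_replicate hr]; simp⟩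
  · intro x y hx0 hx hy0 hy
    have h0 : pvGet2 (List.replicate 16 (List.replicate (16:Nat) (0:Int))) y x = 0 := by
      rw [pvGet2_eq _ _ _ hy0 hx0, List.getElem?_replicate]
      split_ifs with h
      · rw [Option.getD_some, List.getElem?_replicate]
        split_ifs <;> rfl
      · rfl
    rw [h0]
    simp
  · exact List.nodup_nil
  · simp [PySem.List.pyRange_neg_one]
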